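-- pv_equiv track=rewrite | github.com/kismetgerald/Evaluate-STIG-Mods4VatesVMS | .Mods_by_Kismet/Helper_Scripts/fix_batch3b_answerfile_complete.py | add_valid_false_elements
-- ===== SOURCE A (Python) =====
-- def add_valid_false_elements(content):
--     """
--     Add ValidFalseStatus and ValidFalseComment after ValidTrueComment
--     where they are missing.
--
--     Strategy: Find </ValidTrueComment> tags that are NOT followed by
--     <ValidFalseStatus>, and insert both ValidFalseStatus and ValidFalseComment.
--     """
--     fixes_applied = 0
--
--     # Split content into lines for processing
--     lines = content.split('\n')
--     new_lines = []
--
--     i = 0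
--     while i < len(lines):
--         line = lines[i]
--         new_lines.append(line)
--
--         # Check if this line closes ValidTrueComment
--         if '</ValidTrueComment>' in line:
--             # Look ahead to see if ValidFalseStatus follows
--             next_idx = i + 1
--             while next_idx < len(lines) and lines[next_idx].strip() == '':
--                 next_idx += 1
--
--             next_line = lines[next_idx] if next_idx < len(lines) else ''
--
--             # If next non-empty line doesn't have ValidFalseStatus, add it
--             if '<ValidFalseStatus>' not in next_line:
--                 # Extract indentation from current line
--                 indent = len(line) - len(line.lstrip())
--                 indent_str = ' ' * indent
--
--                 # Add ValidFalseStatus and ValidFalseComment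
--                 new_lines.append(f"{indent_str}<ValidFalseStatus>NotAFinding</ValidFalseStatus>")
--                 new_lines.append(f"{indent_str}<ValidFalseComment>This Answer Index should not normally be used. The automated check should properly determine the system status. If the status is incorrect, manual verification may be required to confirm the system configuration meets DoD requirements.</ValidFalseComment>")
--                 fixes_applied += 1
--
--         i += 1
--
--     return '\n'.join(new_lines), fixes_applied
-- ===== SOURCE B (Python) =====
-- STATUS_LINE = "<ValidFalseStatus>NotAFinding</ValidFalseStatus>"
-- COMMENT_LINE = "<ValidFalseComment>This Answer Index should not normally be used. The automated check should properly determine the system status. If the status is incorrect, manual verification may be required to confirm the system configuration meets DoD requirements.</ValidFalseComment>"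
--
--
-- def add_valid_false_elements(content):
--     """Single reverse pass: carry the next non-empty line below instead of an
--     inner blank-skipping lookahead."""
--     fixes_applied = 0
--     lines = content.split('\n')
--     out_rev = []
--     next_nonempty = ''
--     for line in reversed(lines):
--         if '</ValidTrueComment>' in line and '<ValidFalseStatus>' not in next_nonempty:
--             indent_str = ' ' * (len(line) - len(line.lstrip()))
--             out_rev.append(indent_str + COMMENT_LINE)
--             out_rev.append(indent_str + STATUS_LINE)
--             fixes_applied += 1
--         out_rev.append(line)
--         if line.strip() != '':
--             next_nonempty = line
--     out_rev.reverse()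
--     return '\n'.join(out_rev), fixes_applied
-- ===== Notes on version B (the rewrite author's own statement) =====
-- stated objective: alternative
-- what changed: Replaces A's forward pass with a nested blank-skipping lookahead after each </ValidTrueComment> by a single reverse pass that carries the next non-empty line below as state (output assembled in reverse and flipped at the end).
import Mathlib
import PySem

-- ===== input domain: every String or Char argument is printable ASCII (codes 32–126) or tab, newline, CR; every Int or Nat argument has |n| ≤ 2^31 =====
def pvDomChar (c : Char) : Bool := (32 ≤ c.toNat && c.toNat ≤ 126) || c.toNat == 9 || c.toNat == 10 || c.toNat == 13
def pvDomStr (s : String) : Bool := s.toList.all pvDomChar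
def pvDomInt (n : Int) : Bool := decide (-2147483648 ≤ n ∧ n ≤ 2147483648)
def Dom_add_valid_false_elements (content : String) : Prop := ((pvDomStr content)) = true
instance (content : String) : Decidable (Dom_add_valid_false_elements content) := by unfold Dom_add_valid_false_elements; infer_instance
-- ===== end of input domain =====

-- B replaces A's forward pass with an inner blank-skipping lookahead by a single
-- reverse pass that carries the next non-empty line below (objective: alternative
-- decomposition, same asymptotic cost).

-- ===== PORT A =====
-- shared literal pieces of both Pythons (tags and the two inserted lines)
def pvStatusTag : String := "<ValidFalseStatus>NotAFinding</ValidFalseStatus>"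
def pvCommentTag : String := "<ValidFalseComment>This Answer Index should not normally be used. The automated check should properly determine the system status. If the status is incorrect, manual verification may be required to confirm the system configuration meets DoD requirements.</ValidFalseComment>"
-- indent_str = ' ' * (len(line) - len(line.lstrip())); lstrip never lengthens, so .toNat is exact
def pvIndentStr (line : String) : String :=
  String.ofList (List.replicate (PySem.Str.len line - PySem.Str.len (PySem.Str.lstrip line)).toNat ' ')
-- f"{indent_str}{tag}" (string concatenation, done on the char lists)
def pvStatusLine (line : String) : String := String.ofList ((pvIndentStr line).toList ++ pvStatusTag.toList)
def pvCommentLine (line : String) : String := String.ofList ((pvIndentStr line).toList ++ pvCommentTag.toList)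
-- A's inner while loop: first line of rest whose strip() is non-empty, '' if none
def pvFirstNonBlank : List String → String
  | [] => ""
  | l :: rest => if PySem.Str.strip l == "" then pvFirstNonBlank rest else l
-- A's while loop over i, with new_lines carried reversed (reversed at the end)
def pvGoA : List String → List String → Int → List String × Int
  | [], acc, n => (acc.reverse, n)
  | line :: rest, acc, n =>
    let acc' := line :: acc
    if PySem.Str.isIn "</ValidTrueComment>" line then
      if ! PySem.Str.isIn "<ValidFalseStatus>" (pvFirstNonBlank rest) then
        pvGoA rest (pvCommentLine line :: pvStatusLine line :: acc') (n + 1)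
      else pvGoA rest acc' n
    else pvGoA rest acc' n

-- content.split('\n'): sep is non-empty, so split? always returns some
def pvSplitLines (content : String) : List String :=
  match PySem.Str.split? content "\n" with
  | some ls => ls
  | none => []

def add_valid_false_elements (content : String) : String × Int :=
  let lines := pvSplitLines content
  let r := pvGoA lines [] 0
  (PySem.Str.join "\n" r.1, r.2)

-- ===== PORT B =====
-- B's loop body: state (next_nonempty, out_rev, fixes); out_rev is kept cons-first,
-- so the final reversal of the Python list is the identity here
def pvStepB (st : String × List String × Int) (line : String) : String × List String × Int :=
  let (nne, out, n) := st
  let p :=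
    if PySem.Str.isIn "</ValidTrueComment>" line && ! PySem.Str.isIn "<ValidFalseStatus>" nne then
      (line :: pvStatusLine line :: pvCommentLine line :: out, n + 1)
    else (line :: out, n)
  (if PySem.Str.strip line == "" then nne else line, p.1, p.2)

def add_valid_false_elements_alt (content : String) : String × Int :=
  let lines := pvSplitLines content
  let r := lines.reverse.foldl pvStepB ("", [], 0)
  (PySem.Str.join "\n" r.2.1, r.2.2)

-- ===== PRECONDITION & SPEC =====
def Spec_add_valid_false_elements (content : String) (out : String × Int) : Prop := out = add_valid_false_elements_alt content
instance (content : String) (out : String × Int) : Decidable (Spec_add_valid_false_elements content out) := by unfold Spec_add_valid_false_elements; infer_instance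

-- ===== CLAIM (what is proved, stated in full; the proofs are below) =====
def Claim_equal_add_valid_false_elements : Prop := ∀ (content : String), Dom_add_valid_false_elements content → Spec_add_valid_false_elements content (add_valid_false_elements content)

-- ===== LEMMAS AND PROOFS =====
-- reference result of the processing of a line list (proof helper only)
def pvRes : List String → List String × Int
  | [] => ([], 0)
  | line :: rest =>
    let t := pvRes rest
    if PySem.Str.isIn "</ValidTrueComment>" line
        && ! PySem.Str.isIn "<ValidFalseStatus>" (pvFirstNonBlank rest) then
      (line :: pvStatusLine line :: pvCommentLine line :: t.1, t.2 + 1)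
    else (line :: t.1, t.2)

lemma pvGoA_eq (lines : List String) : ∀ (acc : List String) (n : Int),
    pvGoA lines acc n = (acc.reverse ++ (pvRes lines).1, n + (pvRes lines).2) := by
  induction lines with
  | nil => intro acc n; simp [pvGoA, pvRes]
  | cons line rest ih =>
    intro acc n
    simp only [pvGoA, pvRes, ih]
    split_ifs with h1 h2 h3 h4 h5 <;>
      simp_all [Prod.ext_iff] <;> omega

lemma pvFoldB_eq (lines : List String) : ∀ (out : List String) (n : Int),
    lines.foldr (fun x st => pvStepB st x) ("", out, n) =
      (pvFirstNonBlank lines, (pvRes lines).1 ++ out, n + (pvRes lines).2) := by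
  induction lines with
  | nil => intro out n; simp [pvRes, pvFirstNonBlank]
  | cons line rest ih =>
    intro out n
    rw [List.foldr_cons, ih]
    simp only [pvStepB, pvRes, pvFirstNonBlank]
    split_ifs with h1 h2 <;>
      simp_all [Prod.ext_iff] <;> omega

-- ===== VERDICT (by name: the statement is the Claim_ definition above) =====
theorem add_valid_false_elements_spec : Claim_equal_add_valid_false_elements := by
  intro content _
  unfold Spec_add_valid_false_elements add_valid_false_elements add_valid_false_elements_alt
  simp only [List.foldl_reverse, pvFoldB_eq, pvGoA_eq]
  simp
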